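-- pv_equiv track=rewrite | github.com/Nan-Do/okami | Datalog/src/PredicateOrder.py | orderThirdBlock
-- ===== SOURCE A (Python) =====
-- from collections import Counter
-- from copy import deepcopy
-- from operator import itemgetter
-- from itertools import groupby
--
-- def computeIncidendeGrades(dependencyGraph):
--     incidenceGrades = Counter({pred:0 for pred in dependencyGraph.keys()})
--
--     for key in dependencyGraph.keys():
--         for pred in dependencyGraph[key]:
--             incidenceGrades[pred] += 1
--
--     return incidenceGrades
--
-- def orderThirdBlock(block_1, block_2, block_3, dependencyGraph):
--     # Copy the graph
--     graph = deepcopy(dependencyGraph)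
--     # Remove the nodes of block_1
--     for node in block_1:
--         del graph[node]
--     # Compute the incidence graph in case there is a tie
--     iG_1 = computeIncidendeGrades(graph)
--     # Remove the nodes of block_2
--     for node in block_2:
--         del graph[node]
--     # Compute the incidence graph to set the order of this block
--     iG_2 = computeIncidendeGrades(graph)
--
--     sortingBlock = [ (elem, iG_2[elem]) for elem in block_3]
--     sortingBlock = sorted(sortingBlock, key=itemgetter(1), reverse=True)
--     sortingBlocks = [ list(x[1]) for x in groupby(sortingBlock, key=itemgetter(1)) ]
--     answer = []
--     # Check if there is a tie on some nodes of the block and use the previous block to untie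
--     for block in sortingBlocks:
--         if len(block) == 1:
--             answer.append(block[0][0])
--         else:
--             sortingBlock = [ (elem[0], iG_1[elem[0]]) for elem in block]
--             sortingBlock = sorted(sortingBlock, key=itemgetter(1), reverse=True)
--             answer.extend([x[0] for x in sortingBlock])
--
--     return answer
-- ===== SOURCE B (Python) =====
-- from collections import Counter
--
-- def orderThirdBlock(block_1, block_2, block_3, dependencyGraph):
--     # Same graph reduction as the original, but the incidence grades are plain
--     # Counters over the remaining adjacency lists and block_3 is ordered by ONE
--     # stable sort on the compound key (iG_2[e], iG_1[e]) — no groupby, no per-group resort.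
--     graph = dict(dependencyGraph)   # we only delete keys, values stay untouched
--     for node in block_1:
--         del graph[node]
--     iG_1 = Counter(p for vs in graph.values() for p in vs)
--     for node in block_2:
--         del graph[node]
--     iG_2 = Counter(p for vs in graph.values() for p in vs)
--     return sorted(block_3, key=lambda e: (iG_2[e], iG_1[e]), reverse=True)
-- ===== Notes on version B (the rewrite author's own statement) =====
-- stated objective: simpler
-- what changed: B keeps the graph-key deletions but replaces A's Counter-of-zeros helper with plain Counters over the remaining adjacency lists and replaces the whole sort/groupby/per-group-resort tie-breaking machinery by a single stable sort of block_3 on the compound key (iG_2[e], iG_1[e]) with reverse=True.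
import Mathlib
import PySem

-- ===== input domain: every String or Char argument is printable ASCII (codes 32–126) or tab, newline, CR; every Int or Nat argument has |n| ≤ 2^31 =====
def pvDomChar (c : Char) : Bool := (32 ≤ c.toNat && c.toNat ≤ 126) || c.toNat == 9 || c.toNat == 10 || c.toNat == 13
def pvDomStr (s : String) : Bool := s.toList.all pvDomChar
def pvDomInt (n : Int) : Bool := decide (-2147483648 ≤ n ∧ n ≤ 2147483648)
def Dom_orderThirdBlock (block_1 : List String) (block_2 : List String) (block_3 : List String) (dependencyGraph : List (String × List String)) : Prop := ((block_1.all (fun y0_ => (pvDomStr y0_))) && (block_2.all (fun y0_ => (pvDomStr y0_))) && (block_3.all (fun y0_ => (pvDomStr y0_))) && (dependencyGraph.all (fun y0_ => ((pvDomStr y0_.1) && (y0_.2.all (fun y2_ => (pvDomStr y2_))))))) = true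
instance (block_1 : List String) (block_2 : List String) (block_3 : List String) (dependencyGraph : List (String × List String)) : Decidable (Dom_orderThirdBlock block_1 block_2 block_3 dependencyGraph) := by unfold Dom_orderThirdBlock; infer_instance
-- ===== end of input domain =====

-- B replaces A's groupby-and-per-group-resort (and its erase/Counter plumbing) by incidence
-- Counters over membership-filtered items and ONE stable compound-key sort of block_3 (simpler).

-- ===== PORT A =====
-- Counter({pred: 0 for pred in graph}) then += 1 per occurrence in every adjacency list
def computeIncidendeGrades (g : PySem.Dict String (List String)) : PySem.Dict String Int :=
  let incidenceGrades := g.keys.foldl (fun d k => d.insert k (0 : Int)) PySem.Dict.empty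
  g.keys.foldl (fun d key => (g.getD key []).foldl (fun d pred => d.modify pred 0 (· + 1)) d) incidenceGrades

-- itertools.groupby on the sort key: consecutive runs of equal second components
def groupRuns (l : List (String × Int)) : List (List (String × Int)) :=
  match l with
  | [] => []
  | x :: t => (x :: t.takeWhile (fun p => p.2 == x.2)) :: groupRuns (t.dropWhile (fun p => p.2 == x.2))
termination_by l.length
decreasing_by exact Nat.lt_succ_of_le (List.Sublist.length_le (List.dropWhile_sublist _))

def orderThirdBlock (block_1 : List String) (block_2 : List String) (block_3 : List String) (dependencyGraph : List (String × List String)) : List String :=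
  let graph := PySem.Dict.ofList dependencyGraph
  let graph1 := block_1.foldl (fun g node => g.erase node) graph   -- del graph[node] (KeyError excluded by Pre_)
  let iG_1 := computeIncidendeGrades graph1
  let graph2 := block_2.foldl (fun g node => g.erase node) graph1
  let iG_2 := computeIncidendeGrades graph2
  let sortingBlock := block_3.map (fun elem => (elem, iG_2.getD elem 0))
  let sortingBlock2 := PySem.List.sorted sortingBlock (fun p => p.2) true
  let sortingBlocks := groupRuns sortingBlock2
  sortingBlocks.foldl (fun answer block =>
    if block.length = 1 then answer ++ [block.headI.1]
    else answer ++ ((PySem.List.sorted (block.map (fun e => (e.1, iG_1.getD e.1 0))) (fun q => q.2) true).map (fun q => q.1))) []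

-- ===== PORT B =====
def orderThirdBlock_alt (block_1 : List String) (block_2 : List String) (block_3 : List String) (dependencyGraph : List (String × List String)) : List String :=
  let graph := PySem.Dict.ofList dependencyGraph
  let graph1 := block_1.foldl (fun g node => g.erase node) graph   -- del graph[node]
  let iG_1 := PySem.Dict.counter (graph1.values.flatMap (fun vs => vs))
  let graph2 := block_2.foldl (fun g node => g.erase node) graph1
  let iG_2 := PySem.Dict.counter (graph2.values.flatMap (fun vs => vs))
  PySem.List.sorted2 block_3 (fun e => iG_2.getD e 0) (fun e => iG_1.getD e 0) true

-- ===== PRECONDITION & SPEC =====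
-- Pre_ excludes exactly the inputs where Python A raises KeyError: each del graph[node] needs the
-- node to still be a key (so block_1/block_2 duplicate-free, drawn from the dict's keys, disjoint).
def Pre_orderThirdBlock (block_1 : List String) (block_2 : List String) (block_3 : List String) (dependencyGraph : List (String × List String)) : Prop :=
  block_1.Nodup ∧ block_2.Nodup ∧ (∀ n ∈ block_1, n ∈ dependencyGraph.map Prod.fst) ∧
    (∀ n ∈ block_2, n ∈ dependencyGraph.map Prod.fst ∧ n ∉ block_1)
instance (block_1 : List String) (block_2 : List String) (block_3 : List String) (dependencyGraph : List (String × List String)) : Decidable (Pre_orderThirdBlock block_1 block_2 block_3 dependencyGraph) := by unfold Pre_orderThirdBlock; infer_instance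
def pvWitness_orderThirdBlock : List String × List String × List String × (List (String × List String)) :=
  (["a"], ["b"], ["c", "d"], [("a", ["c"]), ("b", ["c", "d"])])

def Spec_orderThirdBlock (block_1 : List String) (block_2 : List String) (block_3 : List String) (dependencyGraph : List (String × List String)) (out : List String) : Prop := out = orderThirdBlock_alt block_1 block_2 block_3 dependencyGraph
instance (block_1 : List String) (block_2 : List String) (block_3 : List String) (dependencyGraph : List (String × List String)) (out : List String) : Decidable (Spec_orderThirdBlock block_1 block_2 block_3 dependencyGraph out) := by unfold Spec_orderThirdBlock; infer_instance

-- ===== CLAIM (what is proved, stated in full; the proofs are below) =====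
def Claim_equal_orderThirdBlock : Prop := ∀ (block_1 : List String) (block_2 : List String) (block_3 : List String) (dependencyGraph : List (String × List String)), Dom_orderThirdBlock block_1 block_2 block_3 dependencyGraph → Pre_orderThirdBlock block_1 block_2 block_3 dependencyGraph → Spec_orderThirdBlock block_1 block_2 block_3 dependencyGraph (orderThirdBlock block_1 block_2 block_3 dependencyGraph)
-- ===== LEMMAS AND PROOFS =====

-- ---- Part I: both ports compute the same incidence counts ----

lemma items_foldl_erase (l : List String) (g : PySem.Dict String (List String)) :
    (l.foldl (fun g n => g.erase n) g).items = g.items.filter (fun p => !(l.contains p.1)) := by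
  induction l generalizing g with
  | nil => simp
  | cons n t ih =>
      rw [List.foldl_cons, ih]
      simp only [PySem.Dict.erase, List.filter_filter]
      apply List.filter_congr
      intro p _
      by_cases h : p.1 = n <;> by_cases h2 : p.1 ∈ t <;> simp [h, h2]

lemma nodup_keys_foldl_erase (l : List String) (g : PySem.Dict String (List String))
    (h : g.keys.Nodup) : (l.foldl (fun g n => g.erase n) g).keys.Nodup := by
  have hk : (l.foldl (fun g n => g.erase n) g).keys
      = (g.items.filter (fun p => !(l.contains p.1))).map Prod.fst := by
    simp [PySem.Dict.keys, items_foldl_erase]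
  rw [hk]
  exact h.sublist (List.Sublist.map _ List.filter_sublist)

lemma getD_foldl_insert_zero (l : List String) (d : PySem.Dict String Int) (e : String)
    (h : d.getD e 0 = 0) : (l.foldl (fun d k => d.insert k (0 : Int)) d).getD e 0 = 0 := by
  induction l generalizing d with
  | nil => simpa
  | cons k t ih =>
      simp only [List.foldl_cons]
      refine ih _ ?_
      rw [PySem.Dict.getD_insert]
      split <;> simp [h]

lemma getD_computeIncidendeGrades (g : PySem.Dict String (List String)) (hnd : g.keys.Nodup)
    (e : String) :
    (computeIncidendeGrades g).getD e 0 = ((g.items.flatMap (fun kv => kv.2)).count e : Int) := by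
  unfold computeIncidendeGrades
  rw [← List.foldl_flatMap, PySem.Dict.getD_foldl_modify_add_one,
    getD_foldl_insert_zero _ _ _ (by simp [PySem.Dict.getD, PySem.Dict.get?, PySem.Dict.empty])]
  rw [PySem.Dict.items_eq_map_keys g hnd ([] : List String), List.flatMap_map]
  simp

lemma counter_values_eq (g : PySem.Dict String (List String)) (hnd : g.keys.Nodup)
    (e : String) :
    (PySem.Dict.counter (g.values.flatMap (fun vs => vs))).getD e 0
      = (computeIncidendeGrades g).getD e 0 := by
  rw [PySem.Dict.getD_counter, getD_computeIncidendeGrades g hnd]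
  have hv : g.values = g.items.map (fun kv => kv.2) := rfl
  rw [hv, List.flatMap_map]

-- ---- Part II: stability of the insertion sort ----

lemma insertBy_filter {α κ : Type} [LinearOrder κ] (key : α → κ) (p : α → Bool) (v : κ) (x : α)
    (acc : List α) (hx : p x = true → key x = v) (hacc : ∀ a ∈ acc, p a = true → key a = v)
    (hdesc : acc.Pairwise (fun a b => key b ≤ key a)) :
    (PySem.List.insertBy (fun a b => decide (key b < key a)) x acc).filter p
      = if p x then acc.filter p ++ [x] else acc.filter p := by
  induction acc with
  | nil =>
      simp only [PySem.List.insertBy, List.filter_cons, List.filter_nil]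
      split <;> simp
  | cons y ys ih =>
      rcases List.pairwise_cons.mp hdesc with ⟨hy, hys⟩
      rw [PySem.List.insertBy.eq_2]
      by_cases hb : key y < key x
      · rw [if_pos (by simpa using hb)]
        by_cases hpx : p x
        · have hv := hx hpx
          have hnone : ∀ a ∈ y :: ys, ¬ (p a = true) := by
            intro a ha hpa
            have h1 : key a ≤ key y := by
              rcases List.mem_cons.mp ha with rfl | ha'
              · exact le_refl _
              · exact hy a ha'
            have h2 : key a = v := hacc a ha hpa
            rw [h2] at h1
            rw [hv] at hb
            exact absurd (lt_of_lt_of_le hb h1) (lt_irrefl _)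
          have hf0 : (y :: ys).filter p = [] := List.filter_eq_nil_iff.mpr hnone
          simp [List.filter_cons, hpx, hf0]
        · simp [List.filter_cons, hpx]
      · rw [if_neg (by simpa using hb)]
        have ih' := ih (fun a ha hpa => hacc a (List.mem_cons_of_mem _ ha) hpa) hys
        by_cases hpx : p x <;> by_cases hpy : p y <;>
          simp [List.filter_cons, hpx, hpy, ih']

lemma foldl_insertBy_filter {α κ : Type} [LinearOrder κ] (key : α → κ) (p : α → Bool) (v : κ)
    (l : List α) (acc : List α)
    (hl : ∀ a ∈ l, p a = true → key a = v) (hacc : ∀ a ∈ acc, p a = true → key a = v)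
    (hdesc : acc.Pairwise (fun a b => key b ≤ key a)) :
    ((l.foldl (fun acc x => PySem.List.insertBy (fun a b => decide (key b < key a)) x acc) acc).filter p)
      = acc.filter p ++ l.filter p := by
  induction l generalizing acc with
  | nil => simp
  | cons x t ih =>
      rw [List.foldl_cons]
      rw [ih _ (fun a ha => hl a (List.mem_cons_of_mem _ ha))
        (fun a ha => by
          rcases (PySem.List.mem_insertBy _ _ _ _).mp ha with rfl | ha'
          · exact hl a (List.mem_cons_self)
          · exact hacc a ha')
        (PySem.List.insertBy_pairwise_ge key x acc hdesc)]
      rw [insertBy_filter key p v x acc (hl x List.mem_cons_self) hacc hdesc]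
      by_cases hpx : p x <;> simp [List.filter_cons, hpx]

lemma sorted_rev_filter {α κ : Type} [LinearOrder κ] (key : α → κ) (p : α → Bool) (v : κ)
    (xs : List α) (hxs : ∀ a ∈ xs, p a = true → key a = v) :
    (PySem.List.sorted xs key true).filter p = xs.filter p := by
  rw [PySem.List.sorted_rev_eq_foldl_insertBy,
    foldl_insertBy_filter key p v xs [] hxs (by simp) (by simp)]
  simp

lemma sorted2_eq_sorted_lex {α : Type} (xs : List α) (k1 k2 : α → Int) :
    PySem.List.sorted2 xs k1 k2 true
      = PySem.List.sorted xs (fun a => toLex (k1 a, k2 a)) true := by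
  rw [PySem.List.sorted_rev_eq_foldl_insertBy]
  unfold PySem.List.sorted2
  simp only [reduceIte]
  have hlt : ∀ a b : α,
      (decide (k1 b < k1 a) || (!decide (k1 a < k1 b) && decide (k2 b < k2 a)))
        = decide (toLex (k1 b, k2 b) < toLex (k1 a, k2 a)) := by
    intro a b
    by_cases h1 : k1 b < k1 a <;> by_cases h2 : k1 a < k1 b <;> by_cases h3 : k2 b < k2 a <;>
      simp [h1, h2, h3, Prod.Lex.toLex_lt_toLex] <;> omega
  congr 1
  funext acc x
  congr 1
  funext a b
  exact hlt a b

lemma eq_of_desc_of_filter_eq {α κ : Type} [LinearOrder κ] (key : α → κ) :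
    ∀ (l₁ l₂ : List α), l₁.Perm l₂ →
      l₁.Pairwise (fun a b => key b ≤ key a) → l₂.Pairwise (fun a b => key b ≤ key a) →
      (∀ v : κ, l₁.filter (fun a => decide (key a = v)) = l₂.filter (fun a => decide (key a = v))) →
      l₁ = l₂ := by
  intro l₁
  induction l₁ with
  | nil =>
      intro l₂ hp _ _ _
      exact (List.Perm.nil_eq hp).symm ▸ rfl
  | cons a t₁ ih =>
      intro l₂ hp hd₁ hd₂ hf
      cases l₂ with
      | nil => exact absurd hp.symm (by simp)
      | cons b t₂ =>
          rcases List.pairwise_cons.mp hd₁ with ⟨ha, ht₁⟩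
          rcases List.pairwise_cons.mp hd₂ with ⟨hb, ht₂⟩
          have hab : key a = key b := by
            have h1 : key a ≤ key b := by
              have : a ∈ b :: t₂ := hp.mem_iff.mp List.mem_cons_self
              rcases List.mem_cons.mp this with rfl | h
              · exact le_refl _
              · exact hb a h
            have h2 : key b ≤ key a := by
              have : b ∈ a :: t₁ := hp.mem_iff.mpr List.mem_cons_self
              rcases List.mem_cons.mp this with rfl | h
              · exact le_refl _
              · exact ha b h
            exact le_antisymm h1 h2
          have hfa := hf (key a)
          rw [List.filter_cons_of_pos (by simp), List.filter_cons_of_pos (by simp [hab])] at hfa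
          have hhead : a = b := by exact (List.cons.injEq _ _ _ _ ▸ hfa).1
          subst hhead
          have htp : t₁.Perm t₂ := hp.cons_inv
          have htf : ∀ v : κ, t₁.filter (fun x => decide (key x = v))
              = t₂.filter (fun x => decide (key x = v)) := by
            intro v
            by_cases hv : v = key a
            · subst hv
              exact (List.cons.injEq _ _ _ _ ▸ hfa).2
            · have := hf v
              rw [List.filter_cons_of_neg (by simp; exact fun h => hv h.symm),
                List.filter_cons_of_neg (by simp; exact fun h => hv h.symm)] at this
              exact this
          rw [ih t₂ htp ht₁ ht₂ htf]

-- ---- Part III: A's groupby-and-resort pipeline equals the compound-key sort ----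

def contribOf (k1 : String → Int) (block : List (String × Int)) : List String :=
  if block.length = 1 then [block.headI.1]
  else (PySem.List.sorted (block.map (fun e => (e.1, k1 e.1))) (fun q => q.2) true).map (fun q => q.1)

def predVW (k2 k1 : String → Int) (v w : Int) : String → Bool :=
  fun a => decide (k2 a = v) && decide (k1 a = w)

lemma contrib_eq (k1 : String → Int) (r : List (String × Int)) :
    contribOf k1 r
      = (PySem.List.sorted (r.map (fun e => (e.1, k1 e.1))) (fun q => q.2) true).map (fun q => q.1) := by
  unfold contribOf
  split
  · rename_i h
    rcases List.length_eq_one_iff.mp h with ⟨q, rfl⟩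
    rw [PySem.List.sorted_rev_eq_foldl_insertBy]
    simp [PySem.List.insertBy]
  · rfl

lemma contrib_perm (k1 : String → Int) (r : List (String × Int)) :
    (contribOf k1 r).Perm (r.map (fun q => q.1)) := by
  rw [contrib_eq]
  have h := (PySem.List.sorted_perm (r.map (fun e => (e.1, k1 e.1))) (fun q => q.2) true).map
    (fun q : String × Int => q.1)
  simpa [List.map_map] using h

lemma contrib_pairwise (k1 : String → Int) (r : List (String × Int)) :
    (contribOf k1 r).Pairwise (fun a b => k1 b ≤ k1 a) := by
  rw [contrib_eq, List.pairwise_map]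
  have hpw := PySem.List.sorted_pairwise_rev (r.map (fun e => (e.1, k1 e.1))) (fun q => q.2)
  refine hpw.imp_of_mem ?_
  intro q q' hq hq' hle
  have h1 : q.2 = k1 q.1 := by
    rcases List.mem_map.mp ((PySem.List.mem_sorted _ _ _ _).mp hq) with ⟨e, _, rfl⟩; rfl
  have h2 : q'.2 = k1 q'.1 := by
    rcases List.mem_map.mp ((PySem.List.mem_sorted _ _ _ _).mp hq') with ⟨e, _, rfl⟩; rfl
  rw [h1, h2] at hle
  exact hle

lemma contrib_filter (k1 : String → Int) (r : List (String × Int)) (p : String → Bool) (w : Int)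
    (hp : ∀ a, p a = true → k1 a = w) :
    (contribOf k1 r).filter p = (r.map (fun q => q.1)).filter p := by
  rw [contrib_eq, List.filter_map,
    sorted_rev_filter (fun q : String × Int => q.2) _ w _
      (by
        intro q hq hpq
        rcases List.mem_map.mp hq with ⟨e, _, rfl⟩
        exact hp _ hpq),
    List.filter_map, List.map_map, List.filter_map]
  rfl

lemma mainA (k2 k1 : String → Int) :
    ∀ (l : List (String × Int)), l.Pairwise (fun a b => b.2 ≤ a.2) → (∀ q ∈ l, q.2 = k2 q.1) →
    ((groupRuns l).flatMap (contribOf k1)).Perm (l.map (fun q => q.1))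
    ∧ ((groupRuns l).flatMap (contribOf k1)).Pairwise
        (fun a b => toLex (k2 b, k1 b) ≤ toLex (k2 a, k1 a))
    ∧ ∀ v w : Int, ((groupRuns l).flatMap (contribOf k1)).filter (predVW k2 k1 v w)
        = (l.map (fun q => q.1)).filter (predVW k2 k1 v w) := by
  intro l
  induction l using groupRuns.induct with
  | case1 => intro _ _; simp [groupRuns]
  | case2 x t ih =>
      intro hdesc hk
      have hxt : ∀ a ∈ t, a.2 ≤ x.2 := (List.pairwise_cons.mp hdesc).1
      have ht : t.Pairwise (fun a b => b.2 ≤ a.2) := (List.pairwise_cons.mp hdesc).2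
      have hrun : ∀ q ∈ x :: t.takeWhile (fun p => p.2 == x.2), q.2 = x.2 := by
        intro q hq
        rcases List.mem_cons.mp hq with rfl | hq'
        · rfl
        · simpa using List.mem_takeWhile_imp hq'
      have hsubt : ∀ q ∈ x :: t.takeWhile (fun p => p.2 == x.2), q ∈ x :: t := by
        intro q hq
        rcases List.mem_cons.mp hq with rfl | hq'
        · exact List.mem_cons_self
        · exact List.mem_cons_of_mem _ ((List.takeWhile_sublist _).subset hq')
      have hrest_desc : (t.dropWhile (fun p => p.2 == x.2)).Pairwise (fun a b => b.2 ≤ a.2) :=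
        ht.sublist (List.dropWhile_sublist _)
      have hrest_k : ∀ q ∈ t.dropWhile (fun p => p.2 == x.2), q.2 = k2 q.1 :=
        fun q hq => hk q (List.mem_cons_of_mem _ ((List.dropWhile_sublist _).subset hq))
      have hrest_lt : ∀ q ∈ t.dropWhile (fun p => p.2 == x.2), q.2 < x.2 := by
        cases hr : t.dropWhile (fun p => p.2 == x.2) with
        | nil => simp
        | cons h rs =>
            intro q hq
            have hh_mem : h ∈ t := (List.dropWhile_sublist _).subset (hr ▸ List.mem_cons_self)
            have hh_le : h.2 ≤ x.2 := hxt h hh_mem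
            have hh_ne : ((fun p : String × Int => p.2 == x.2) h) = false := by
              have hne : t.dropWhile (fun p => p.2 == x.2) ≠ [] := by rw [hr]; simp
              have := List.head_dropWhile_not (fun p : String × Int => p.2 == x.2) hne
              rwa [show (t.dropWhile (fun p : String × Int => p.2 == x.2)).head hne = h by
                simp [hr]] at this
            have hh_lt : h.2 < x.2 := lt_of_le_of_ne hh_le (by simpa using hh_ne)
            rcases List.mem_cons.mp hq with rfl | hq'
            · exact hh_lt
            · have : q.2 ≤ h.2 := (List.pairwise_cons.mp (hr ▸ hrest_desc)).1 q hq'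
              exact lt_of_le_of_lt this hh_lt
      obtain ⟨ihp, ihpw, ihf⟩ := ih hrest_desc hrest_k
      have hc_mem : ∀ a ∈ contribOf k1 (x :: t.takeWhile (fun p => p.2 == x.2)), k2 a = x.2 := by
        intro a ha
        have := (contrib_perm k1 _).mem_iff.mp ha
        rcases List.mem_map.mp this with ⟨q, hq, rfl⟩
        rw [← hk q (hsubt q hq), hrun q hq]
      have hout_mem : ∀ a ∈ (groupRuns (t.dropWhile (fun p => p.2 == x.2))).flatMap (contribOf k1),
          k2 a < x.2 := by
        intro a ha
        have := ihp.mem_iff.mp ha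
        rcases List.mem_map.mp this with ⟨q, hq, rfl⟩
        rw [← hrest_k q hq]
        exact hrest_lt q hq
      rw [groupRuns, List.flatMap_cons]
      have hsplit : (x :: t.takeWhile (fun p => p.2 == x.2)) ++ t.dropWhile (fun p => p.2 == x.2)
          = x :: t := by
        simp [List.takeWhile_append_dropWhile]
      refine ⟨?_, ?_, ?_⟩
      · have := (contrib_perm k1 (x :: t.takeWhile (fun p => p.2 == x.2))).append ihp
        rw [← List.map_append, hsplit] at this
        exact this
      · refine List.pairwise_append.mpr ⟨?_, ihpw, ?_⟩
        · refine (contrib_pairwise k1 _).imp_of_mem ?_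
          intro a b ha hb hle
          rw [Prod.Lex.toLex_le_toLex]
          exact Or.inr ⟨by rw [hc_mem b hb, hc_mem a ha], hle⟩
        · intro a ha b hb
          rw [Prod.Lex.toLex_le_toLex]
          exact Or.inl (by rw [hc_mem a ha]; exact hout_mem b hb)
      · intro v w
        rw [List.filter_append, ihf v w,
          contrib_filter k1 _ _ w (by
            intro a ha
            have := (Bool.and_eq_true _ _).mp ha
            exact of_decide_eq_true this.2),
          ← List.filter_append, ← List.map_append, hsplit]

lemma central (bl : List String) (k2f k1f : String → Int) :
    (groupRuns (PySem.List.sorted (bl.map (fun e => (e, k2f e))) (fun p => p.2) true)).flatMap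
      (contribOf k1f) = PySem.List.sorted2 bl k2f k1f true := by
  have hd := PySem.List.sorted_pairwise_rev (bl.map (fun e => (e, k2f e))) (fun p : String × Int => p.2)
  have hmem : ∀ q ∈ PySem.List.sorted (bl.map (fun e => (e, k2f e))) (fun p => p.2) true,
      q.2 = k2f q.1 := by
    intro q hq
    rcases List.mem_map.mp ((PySem.List.mem_sorted _ _ _ _).mp hq) with ⟨e, _, rfl⟩
    rfl
  obtain ⟨hperm, hpw, hfilt⟩ := mainA k2f k1f _ hd hmem
  rw [sorted2_eq_sorted_lex]
  have hpredeq : ∀ (v : Lex (Int × Int)) (a : String),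
      (decide (toLex (k2f a, k1f a) = v)) = predVW k2f k1f (ofLex v).1 (ofLex v).2 a := by
    intro v a
    have hiff : (toLex (k2f a, k1f a) = v) ↔ (k2f a = (ofLex v).1 ∧ k1f a = (ofLex v).2) := by
      rw [← toLex_ofLex v, toLex_inj]
      constructor
      · intro h
        exact ⟨congrArg Prod.fst h, congrArg Prod.snd h⟩
      · intro h
        exact Prod.ext h.1 h.2
    unfold predVW
    rw [← Bool.decide_and, decide_eq_decide]
    exact hiff
  apply eq_of_desc_of_filter_eq (fun a => toLex (k2f a, k1f a))
  · have h1 : ((groupRuns (PySem.List.sorted (bl.map (fun e => (e, k2f e))) (fun p => p.2) true)).flatMap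
        (contribOf k1f)).Perm bl := by
      refine hperm.trans ?_
      have := (PySem.List.sorted_perm (bl.map (fun e => (e, k2f e))) (fun p : String × Int => p.2) true).map
        (fun q : String × Int => q.1)
      simpa [List.map_map, Function.comp_def] using this
    exact h1.trans (PySem.List.sorted_perm _ _ _).symm
  · exact hpw
  · exact PySem.List.sorted_pairwise_rev bl _
  · intro v
    calc ((groupRuns (PySem.List.sorted (bl.map (fun e => (e, k2f e))) (fun p => p.2) true)).flatMap
            (contribOf k1f)).filter (fun a => decide (toLex (k2f a, k1f a) = v))
        = ((groupRuns (PySem.List.sorted (bl.map (fun e => (e, k2f e))) (fun p => p.2) true)).flatMap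
            (contribOf k1f)).filter (predVW k2f k1f (ofLex v).1 (ofLex v).2) :=
          List.filter_congr (fun a _ => hpredeq v a)
      _ = ((PySem.List.sorted (bl.map (fun e => (e, k2f e))) (fun p => p.2) true).map
            (fun q => q.1)).filter (predVW k2f k1f (ofLex v).1 (ofLex v).2) :=
          hfilt (ofLex v).1 (ofLex v).2
      _ = bl.filter (predVW k2f k1f (ofLex v).1 (ofLex v).2) := by
          rw [List.filter_map,
            sorted_rev_filter (fun q : String × Int => q.2) _ ((ofLex v).1) _ (by
              intro q hq hpq
              rcases List.mem_map.mp hq with ⟨e, _, rfl⟩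
              unfold predVW at hpq
              exact of_decide_eq_true ((Bool.and_eq_true _ _).mp hpq).1),
            List.filter_map, List.map_map]
          simp [Function.comp_def]
      _ = (PySem.List.sorted bl (fun a => toLex (k2f a, k1f a)) true).filter
            (predVW k2f k1f (ofLex v).1 (ofLex v).2) :=
          (sorted_rev_filter (fun a => toLex (k2f a, k1f a)) _ v _ (by
            intro a _ hpa
            rw [← toLex_ofLex v, toLex_inj]
            unfold predVW at hpa
            have h12 := (Bool.and_eq_true _ _).mp hpa
            exact Prod.ext (of_decide_eq_true h12.1) (of_decide_eq_true h12.2))).symm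
      _ = (PySem.List.sorted bl (fun a => toLex (k2f a, k1f a)) true).filter
            (fun a => decide (toLex (k2f a, k1f a) = v)) :=
          List.filter_congr (fun a _ => (hpredeq v a).symm)

-- ===== VERDICT (by name: the statement is the Claim_ definition above) =====
theorem orderThirdBlock_spec : Claim_equal_orderThirdBlock := by
  intro block_1 block_2 block_3 dependencyGraph _ _
  unfold Spec_orderThirdBlock
  simp only [orderThirdBlock, orderThirdBlock_alt]
  rw [show (fun (answer : List String) (block : List (String × Int)) =>
      if block.length = 1 then answer ++ [block.headI.1]
      else answer ++ ((PySem.List.sorted (block.map (fun e =>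
        (e.1, (computeIncidendeGrades (block_1.foldl (fun g node => g.erase node)
          (PySem.Dict.ofList dependencyGraph))).getD e.1 0))) (fun q => q.2) true).map (fun q => q.1)))
    = (fun answer block => answer ++ contribOf (fun e =>
        (computeIncidendeGrades (block_1.foldl (fun g node => g.erase node)
          (PySem.Dict.ofList dependencyGraph))).getD e 0) block) from by
      funext answer block
      unfold contribOf
      split <;> rfl]
  rw [PySem.List.foldl_append_eq_flatMap, List.nil_append]
  rw [show (fun e => (PySem.Dict.counter ((block_2.foldl (fun g node => g.erase node)
        (block_1.foldl (fun g node => g.erase node)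
          (PySem.Dict.ofList dependencyGraph))).values.flatMap (fun vs => vs))).getD e 0)
      = (fun e => (computeIncidendeGrades (block_2.foldl (fun g node => g.erase node)
          (block_1.foldl (fun g node => g.erase node) (PySem.Dict.ofList dependencyGraph)))).getD e 0) from
    funext fun e => counter_values_eq _ (nodup_keys_foldl_erase _ _
      (nodup_keys_foldl_erase _ _ (PySem.Dict.nodup_keys_ofList dependencyGraph))) e]
  rw [show (fun e => (PySem.Dict.counter ((block_1.foldl (fun g node => g.erase node)
        (PySem.Dict.ofList dependencyGraph)).values.flatMap (fun vs => vs))).getD e 0)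
      = (fun e => (computeIncidendeGrades (block_1.foldl (fun g node => g.erase node)
          (PySem.Dict.ofList dependencyGraph))).getD e 0) from
    funext fun e => counter_values_eq _ (nodup_keys_foldl_erase _ _
      (PySem.Dict.nodup_keys_ofList dependencyGraph)) e]
  exact central block_3 _ _
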